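-- pv_equiv track=rewrite | github.com/dwavesystems/dwave-experimental | dwave/experimental/automorphism/automorphism_composite.py | prune_by_nodeset
-- ===== SOURCE A (Python) =====
-- def prune_by_nodeset(generator_dict, nodeset):
--     """Restrict a generator to a subspace defined by nodeset
--
--     Args:
--         generator_dict: An automorphism as a dictionary.
--         nodeset: A list of variables (in the subgraph).
--
--     Returns:
--         a generator restricted to the subspace defined by the nodeset,
--         or an empty dictionary if the nodeset is not closed under the
--         generator.
--
--     .. note:: The generator keys need only specify a subset of
--         variables in the nodeset. Variables not specified in the generator
--         (dictionary format) are assumed to map 1:1.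
--
--     """
--
--     nodeset = nodeset.intersection(set(generator_dict.keys()))
--     if not nodeset:
--         return {}
--     reduced_nodeset = nodeset & set({generator_dict[n] for n in nodeset})
--     while reduced_nodeset != nodeset:
--         nodeset = reduced_nodeset
--         reduced_nodeset = nodeset & set({generator_dict[n] for n in nodeset})
--     return {n: generator_dict[n] for n in nodeset}
-- ===== SOURCE B (Python) =====
-- def prune_by_nodeset(generator_dict, nodeset):
--     """Restrict a generator to a subspace defined by nodeset.
--
--     In-degree peeling on the functional graph with a worklist instead of
--     repeated whole-set fixpoint rounds.
--     """
--     live = {n for n in nodeset if n in generator_dict}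
--     indeg = {n: 0 for n in live}
--     for n in live:
--         t = generator_dict[n]
--         if t in indeg:
--             indeg[t] += 1
--     stack = [n for n in live if indeg[n] == 0]
--     while stack:
--         n = stack.pop()
--         live.discard(n)
--         t = generator_dict[n]
--         if t in live:
--             indeg[t] -= 1
--             if indeg[t] == 0:
--                 stack.append(t)
--     return {n: generator_dict[n] for n in nodeset if n in live}
-- ===== Notes on version B (the rewrite author's own statement) =====
-- stated objective: alternative
-- what changed: A repeatedly recomputes the image set of the surviving nodes and intersects until a fixpoint; B builds the restricted functional graph's in-degree table once and peels zero-in-degree nodes with a worklist, cascading deletions.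
import Mathlib
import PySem

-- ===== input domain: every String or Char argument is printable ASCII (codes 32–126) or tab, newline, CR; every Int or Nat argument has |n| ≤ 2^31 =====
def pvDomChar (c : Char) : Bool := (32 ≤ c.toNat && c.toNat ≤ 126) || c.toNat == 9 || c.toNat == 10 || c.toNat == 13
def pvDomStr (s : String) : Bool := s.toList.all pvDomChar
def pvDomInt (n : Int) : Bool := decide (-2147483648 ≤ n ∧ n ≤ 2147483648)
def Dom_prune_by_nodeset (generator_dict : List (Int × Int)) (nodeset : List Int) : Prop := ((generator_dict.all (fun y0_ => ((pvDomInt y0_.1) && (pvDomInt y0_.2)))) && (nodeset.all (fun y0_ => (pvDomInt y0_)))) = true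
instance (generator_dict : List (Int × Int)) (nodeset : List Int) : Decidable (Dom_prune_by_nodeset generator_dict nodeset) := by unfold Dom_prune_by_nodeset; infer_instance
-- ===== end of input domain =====

-- B replaces A's repeated whole-set fixpoint rounds by in-degree peeling over the
-- functional graph with a worklist (objective: alternative algorithm, same result).
-- Both ports return the result dict as an association list; like Python's dict output
-- it is compared as a dict (order-insensitively) by the behavioural tester, and the two
-- ports are proved to produce the SAME list.

-- ===== PORT A =====
-- generator_dict[n]  (n is always a key when evaluated; getD is exact there)
def pvLook (gd : List (Int × Int)) (n : Int) : Int := PySem.Dict.getD (PySem.Dict.mk gd) n 0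

-- nodeset = nodeset.intersection(set(generator_dict.keys()))
def pvNs0 (gd : List (Int × Int)) (nodeset : List Int) : PySem.Set Int :=
  PySem.Set.inter nodeset (PySem.Set.ofList (PySem.Dict.keys (PySem.Dict.mk gd)))

-- nodeset & set({generator_dict[n] for n in nodeset})
def pvRed (gd : List (Int × Int)) (ns : List Int) : PySem.Set Int :=
  PySem.Set.inter ns (PySem.Set.ofList (ns.map (pvLook gd)))

-- while reduced_nodeset != nodeset: …  (fuel ns.length + 1 always suffices: the set
-- strictly shrinks every iteration)
def pruneLoopA (gd : List (Int × Int)) : Nat → PySem.Set Int → PySem.Set Int → PySem.Set Int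
  | 0, ns, _ => ns
  | fuel + 1, ns, red =>
    if PySem.Set.equal red ns then ns
    else pruneLoopA gd fuel red (pvRed gd red)

def prune_by_nodeset (generator_dict : List (Int × Int)) (nodeset : List Int) : List (Int × Int) :=
  if pvNs0 generator_dict nodeset = [] then []
  else
    ((pruneLoopA generator_dict ((pvNs0 generator_dict nodeset).length + 1)
        (pvNs0 generator_dict nodeset)
        (pvRed generator_dict (pvNs0 generator_dict nodeset))).foldl
      (fun d n => PySem.Dict.insert d n (pvLook generator_dict n)) PySem.Dict.empty).items

-- ===== PORT B =====
-- live = {n for n in nodeset if n in generator_dict}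
def pvLive0 (gd : List (Int × Int)) (nodeset : List Int) : PySem.Set Int :=
  PySem.Set.ofList (nodeset.filter (fun n => PySem.Dict.contains (PySem.Dict.mk gd) n))

-- indeg = {n: 0 for n in live}
def pruneInitB (live : List Int) : PySem.Dict Int Int :=
  live.foldl (fun d n => PySem.Dict.insert d n 0) PySem.Dict.empty

-- for n in live: t = generator_dict[n]; if t in indeg: indeg[t] += 1
def pruneCountB (gd : List (Int × Int)) (live : List Int) : PySem.Dict Int Int :=
  live.foldl
    (fun d n =>
      if PySem.Dict.contains d (pvLook gd n) then
        PySem.Dict.insert d (pvLook gd n) (PySem.Dict.getD d (pvLook gd n) 0 + 1)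
      else d)
    (pruneInitB live)

-- stack = [n for n in live if indeg[n] == 0]
def pvStack0 (gd : List (Int × Int)) (live : List Int) : List Int :=
  live.filter (fun n => PySem.Dict.getD (pruneCountB gd live) n 0 == 0)

-- while stack: n = stack.pop(); live.discard(n); …  (the Lean stack keeps its top at the
-- head; each iteration removes one live node, so fuel = |live| suffices)
def pruneLoopB (gd : List (Int × Int)) :
    Nat → PySem.Set Int → PySem.Dict Int Int → List Int → PySem.Set Int
  | 0, live, _, _ => live
  | _ + 1, live, _, [] => live
  | fuel + 1, live, indeg, n :: rest =>
    if PySem.Set.contains (PySem.Set.discard live n) (pvLook gd n) then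
      if PySem.Dict.getD indeg (pvLook gd n) 0 - 1 = 0 then
        pruneLoopB gd fuel (PySem.Set.discard live n)
          (PySem.Dict.insert indeg (pvLook gd n) (PySem.Dict.getD indeg (pvLook gd n) 0 - 1))
          (pvLook gd n :: rest)
      else
        pruneLoopB gd fuel (PySem.Set.discard live n)
          (PySem.Dict.insert indeg (pvLook gd n) (PySem.Dict.getD indeg (pvLook gd n) 0 - 1))
          rest
    else pruneLoopB gd fuel (PySem.Set.discard live n) indeg rest

def prune_by_nodeset_alt (generator_dict : List (Int × Int)) (nodeset : List Int) : List (Int × Int) :=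
  ((nodeset.filter (fun n =>
      PySem.Set.contains
        (pruneLoopB generator_dict (pvLive0 generator_dict nodeset).length
          (pvLive0 generator_dict nodeset)
          (pruneCountB generator_dict (pvLive0 generator_dict nodeset))
          (pvStack0 generator_dict (pvLive0 generator_dict nodeset))) n)).foldl
    (fun d n => PySem.Dict.insert d n (pvLook generator_dict n)) PySem.Dict.empty).items

-- ===== PRECONDITION & SPEC =====
-- Pre_ only states the representation invariant of the Python set argument `nodeset`
-- (distinct elements); it excludes no input the Python A accepts, since a Python set
-- cannot contain duplicates.
def Pre_prune_by_nodeset (generator_dict : List (Int × Int)) (nodeset : List Int) : Prop :=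
  nodeset.Nodup
instance (generator_dict : List (Int × Int)) (nodeset : List Int) : Decidable (Pre_prune_by_nodeset generator_dict nodeset) := by unfold Pre_prune_by_nodeset; infer_instance

def pvWitness_prune_by_nodeset : (List (Int × Int)) × List Int := ([(1, 2), (2, 1)], [1, 2])

def Spec_prune_by_nodeset (generator_dict : List (Int × Int)) (nodeset : List Int) (out : List (Int × Int)) : Prop := out = prune_by_nodeset_alt generator_dict nodeset
instance (generator_dict : List (Int × Int)) (nodeset : List Int) (out : List (Int × Int)) : Decidable (Spec_prune_by_nodeset generator_dict nodeset out) := by unfold Spec_prune_by_nodeset; infer_instance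

-- ===== CLAIM (what is proved, stated in full; the proofs are below) =====
def Claim_equal_prune_by_nodeset : Prop := ∀ (generator_dict : List (Int × Int)) (nodeset : List Int), Dom_prune_by_nodeset generator_dict nodeset → Pre_prune_by_nodeset generator_dict nodeset → Spec_prune_by_nodeset generator_dict nodeset (prune_by_nodeset generator_dict nodeset)

-- ===== LEMMAS AND PROOFS =====

-- number of live preimages of t under the generator
def pvCnt (gd : List (Int × Int)) (t : Int) (l : List Int) : Nat :=
  l.countP (fun n => pvLook gd n == t)

-- "T is closed": every element of T has a preimage in T
def pvClosed (gd : List (Int × Int)) (T : List Int) : Prop :=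
  ∀ m ∈ T, ∃ p ∈ T, pvLook gd p = m

theorem pv_bool_eq_of_iff {a b : Bool} (h : a = true ↔ b = true) : a = b := by
  cases a <;> cases b <;> simp_all

theorem pv_discard_eq_erase {l : List Int} {n : Int} (hnd : l.Nodup) :
    PySem.Set.discard l n = l.erase n := by
  show l.filter (fun y => !(y == n)) = l.erase n
  rw [hnd.erase_eq_filter]
  exact List.filter_congr (fun x _ => by simp [bne])

theorem pv_discard_perm {l : List Int} {n : Int} (hnd : l.Nodup) (hn : n ∈ l) :
    l.Perm (n :: PySem.Set.discard l n) := by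
  rw [pv_discard_eq_erase hnd]
  exact List.perm_cons_erase hn

theorem pv_length_discard {l : List Int} {n : Int} (hnd : l.Nodup) (hn : n ∈ l) :
    l.length = (PySem.Set.discard l n).length + 1 := by
  simpa using (pv_discard_perm hnd hn).length_eq

theorem pv_cnt_discard (gd : List (Int × Int)) {l : List Int} {n : Int} (hnd : l.Nodup)
    (hn : n ∈ l) (t : Int) :
    pvCnt gd t l = pvCnt gd t (PySem.Set.discard l n) + (if pvLook gd n == t then 1 else 0) := by
  unfold pvCnt
  rw [(pv_discard_perm hnd hn).countP_eq]
  simp [List.countP_cons]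

theorem pv_cnt_pos (gd : List (Int × Int)) (t : Int) (l : List Int) :
    pvCnt gd t l ≠ 0 ↔ ∃ p ∈ l, pvLook gd p = t := by
  unfold pvCnt
  constructor
  · intro h
    have hpos := List.countP_pos_iff.1 (Nat.pos_of_ne_zero h)
    simpa using hpos
  · rintro ⟨p, hp, he⟩
    have hpos : 0 < l.countP (fun n => pvLook gd n == t) :=
      List.countP_pos_iff.2 ⟨p, hp, by simp [he]⟩
    omega

theorem pv_cnt_le_discard (gd : List (Int × Int)) (t : Int) (l : List Int) (n : Int) :
    pvCnt gd t (PySem.Set.discard l n) ≤ pvCnt gd t l := by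
  unfold pvCnt
  show List.countP _ (l.filter _) ≤ _
  exact List.Sublist.countP_le List.filter_sublist

theorem pv_initB_getD_aux (l : List Int) :
    ∀ (d : PySem.Dict Int Int), (∀ t, PySem.Dict.getD d t 0 = 0) →
    ∀ t, PySem.Dict.getD (l.foldl (fun d n => PySem.Dict.insert d n 0) d) t 0 = 0 := by
  induction l with
  | nil => intro d h t; simpa using h t
  | cons n l ih =>
    intro d h t
    simp only [List.foldl_cons]
    refine ih _ (fun u => ?_) t
    rw [PySem.Dict.getD_insert]
    split
    · rfl
    · exact h u

theorem pv_initB_getD (live : List Int) (t : Int) :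
    PySem.Dict.getD (pruneInitB live) t 0 = 0 := by
  unfold pruneInitB
  exact pv_initB_getD_aux live PySem.Dict.empty (fun u => by simp) t

theorem pv_initB_contains (live : List Int) (x : Int) :
    PySem.Dict.contains (pruneInitB live) x = decide (x ∈ live) := by
  unfold pruneInitB
  rw [PySem.Dict.contains_eq_decide_mem_keys,
      PySem.Dict.keys_foldl_insert (f := fun _ _ => (0 : Int))]
  simp [PySem.Set.mem_ofList, PySem.Set.update_nil_left]

theorem pv_countB_aux (gd : List (Int × Int)) (live : List Int) :
    ∀ (l : List Int) (d : PySem.Dict Int Int),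
    (∀ x, PySem.Dict.contains d x = decide (x ∈ live)) →
    (∀ x, PySem.Dict.contains
        (l.foldl
          (fun d n =>
            if PySem.Dict.contains d (pvLook gd n) then
              PySem.Dict.insert d (pvLook gd n) (PySem.Dict.getD d (pvLook gd n) 0 + 1)
            else d) d) x = decide (x ∈ live)) ∧
    (∀ t ∈ live, PySem.Dict.getD
        (l.foldl
          (fun d n =>
            if PySem.Dict.contains d (pvLook gd n) then
              PySem.Dict.insert d (pvLook gd n) (PySem.Dict.getD d (pvLook gd n) 0 + 1)
            else d) d) t 0 = PySem.Dict.getD d t 0 + (pvCnt gd t l : Int)) := by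
  intro l
  induction l with
  | nil => intro d h; exact ⟨h, fun t _ => by simp [pvCnt]⟩
  | cons n l ih =>
    intro d h
    simp only [List.foldl_cons]
    by_cases hm : pvLook gd n ∈ live
    · have hc : PySem.Dict.contains d (pvLook gd n) = true := by rw [h]; simpa using hm
      rw [if_pos hc]
      set d' := PySem.Dict.insert d (pvLook gd n) (PySem.Dict.getD d (pvLook gd n) 0 + 1) with hd'
      have hcont' : ∀ x, PySem.Dict.contains d' x = decide (x ∈ live) := by
        intro x
        rw [hd', PySem.Dict.contains_insert]
        by_cases hx : x = pvLook gd n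
        · subst hx; simp [hm]
        · simp only [h x]
          have : (x == pvLook gd n) = false := beq_eq_false_iff_ne.2 hx
          rw [this, Bool.false_or]
      obtain ⟨ih1, ih2⟩ := ih d' hcont'
      refine ⟨ih1, fun t ht => ?_⟩
      rw [ih2 t ht, hd', PySem.Dict.getD_insert]
      have hcnt : pvCnt gd t (n :: l) = pvCnt gd t l + (if pvLook gd n == t then 1 else 0) := by
        unfold pvCnt; rw [List.countP_cons]
      by_cases htn : t = pvLook gd n
      · subst htn
        rw [if_pos rfl, hcnt]
        simp only [beq_self_eq_true, if_true]
        push_cast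
        ring
      · rw [if_neg htn, hcnt]
        have : (pvLook gd n == t) = false := beq_eq_false_iff_ne.2 (fun he => htn he.symm)
        rw [this]
        simp only [Bool.false_eq_true, if_false]
        push_cast
        ring
    · have hc : PySem.Dict.contains d (pvLook gd n) = false := by rw [h]; simpa using hm
      rw [hc]
      simp only [Bool.false_eq_true, if_false]
      obtain ⟨ih1, ih2⟩ := ih d h
      refine ⟨ih1, fun t ht => ?_⟩
      rw [ih2 t ht]
      have : (pvLook gd n == t) = false := beq_eq_false_iff_ne.2 (fun he => hm (he ▸ ht))
      unfold pvCnt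
      rw [List.countP_cons, this]
      simp

theorem pv_countB_getD (gd : List (Int × Int)) (live : List Int) :
    ∀ t ∈ live, PySem.Dict.getD (pruneCountB gd live) t 0 = (pvCnt gd t live : Int) := by
  intro t ht
  unfold pruneCountB
  have := (pv_countB_aux gd live live (pruneInitB live) (pv_initB_contains live)).2 t ht
  rw [this, pv_initB_getD]
  ring

-- the peeling loop: its result is closed and contains every closed subset of live
theorem pv_peelB (gd : List (Int × Int)) :
    ∀ (fuel : Nat) (live : List Int) (indeg : PySem.Dict Int Int) (stack : List Int),
    live.Nodup →
    (∀ x ∈ stack, x ∈ live) →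
    stack.Nodup →
    (∀ t ∈ stack, pvCnt gd t live = 0) →
    (∀ t ∈ live, PySem.Dict.getD indeg t 0 = (pvCnt gd t live : Int)) →
    (∀ u ∈ live, pvCnt gd u live = 0 → u ∈ stack) →
    live.length ≤ fuel →
    (∀ x ∈ pruneLoopB gd fuel live indeg stack, x ∈ live) ∧
    pvClosed gd (pruneLoopB gd fuel live indeg stack) ∧
    (∀ T, (∀ x ∈ T, x ∈ live) → pvClosed gd T →
      ∀ x ∈ T, x ∈ pruneLoopB gd fuel live indeg stack) := by
  intro fuel
  induction fuel with
  | zero =>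
    intro live indeg stack h1 h2 h3 h4 h5 h6 h7
    have hl : live = [] := List.eq_nil_of_length_eq_zero (Nat.le_zero.1 h7)
    subst hl
    simp only [pruneLoopB]
    exact ⟨fun x hx => hx, fun m hm => absurd hm (by simp),
      fun T hT hcl x hx => hT x hx⟩
  | succ fuel ih =>
    intro live indeg stack h1 h2 h3 h4 h5 h6 h7
    cases stack with
    | nil =>
      simp only [pruneLoopB]
      refine ⟨fun x hx => hx, ?_, fun T hT hcl x hx => hT x hx⟩
      intro m hm
      have hne : pvCnt gd m live ≠ 0 := fun h0 => absurd (h6 m hm h0) (by simp)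
      exact (pv_cnt_pos gd m live).1 hne
    | cons n rest =>
      simp only [pruneLoopB]
      have hnl : n ∈ live := h2 n List.mem_cons_self
      have hcnt0 : pvCnt gd n live = 0 := h4 n List.mem_cons_self
      have hnd' : (PySem.Set.discard live n).Nodup := PySem.Set.nodup_discard live n h1
      have hmem' : ∀ x, x ∈ PySem.Set.discard live n ↔ x ∈ live ∧ x ≠ n :=
        fun x => PySem.Set.mem_discard live n x
      have hlen' : live.length = (PySem.Set.discard live n).length + 1 :=
        pv_length_discard h1 hnl
      have hcntd : ∀ u, pvCnt gd u live
          = pvCnt gd u (PySem.Set.discard live n) + (if pvLook gd n == u then 1 else 0) :=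
        fun u => pv_cnt_discard gd h1 hnl u
      have hrest_live' : ∀ x ∈ rest, x ∈ PySem.Set.discard live n := by
        intro x hx
        have hxl := h2 x (List.mem_cons_of_mem n hx)
        have hxn : x ≠ n := by rintro rfl; exact (List.nodup_cons.1 h3).1 hx
        exact (hmem' x).2 ⟨hxl, hxn⟩
      have hrest0 : ∀ u ∈ rest, pvCnt gd u (PySem.Set.discard live n) = 0 := fun u hu =>
        Nat.le_zero.1 ((pv_cnt_le_discard gd u live n).trans
          (le_of_eq (h4 u (List.mem_cons_of_mem n hu))))
      have hT' : ∀ T, (∀ x ∈ T, x ∈ live) → pvClosed gd T →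
          ∀ x ∈ T, x ∈ PySem.Set.discard live n := by
        intro T hT hcl
        have hnT : n ∉ T := by
          intro hnT
          obtain ⟨p, hp, hpe⟩ := hcl n hnT
          exact (pv_cnt_pos gd n live).2 ⟨p, hT p hp, hpe⟩ hcnt0
        intro x hx
        exact (hmem' x).2 ⟨hT x hx, fun he => hnT (he ▸ hx)⟩
      by_cases hin : PySem.Set.contains (PySem.Set.discard live n) (pvLook gd n) = true
      · rw [if_pos hin]
        have htl' : pvLook gd n ∈ PySem.Set.discard live n := (PySem.Set.contains_iff _ _).1 hin
        have htl : pvLook gd n ∈ live := ((hmem' _).1 htl').1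
        have hvt : PySem.Dict.getD indeg (pvLook gd n) 0 = (pvCnt gd (pvLook gd n) live : Int) :=
          h5 _ htl
        have hcnt_t : pvCnt gd (pvLook gd n) live
            = pvCnt gd (pvLook gd n) (PySem.Set.discard live n) + 1 := by
          rw [hcntd (pvLook gd n)]; simp
        have hv : PySem.Dict.getD indeg (pvLook gd n) 0 - 1
            = (pvCnt gd (pvLook gd n) (PySem.Set.discard live n) : Int) := by
          rw [hvt, hcnt_t]; push_cast; ring
        have h5' : ∀ u ∈ PySem.Set.discard live n,
            PySem.Dict.getD (PySem.Dict.insert indeg (pvLook gd n)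
              (PySem.Dict.getD indeg (pvLook gd n) 0 - 1)) u 0
            = (pvCnt gd u (PySem.Set.discard live n) : Int) := by
          intro u hu
          rw [PySem.Dict.getD_insert]
          by_cases hut : u = pvLook gd n
          · subst hut; rw [if_pos rfl]; exact hv
          · rw [if_neg hut, h5 u ((hmem' u).1 hu).1, hcntd u,
              beq_eq_false_iff_ne.2 (fun he => hut he.symm)]
            simp
        by_cases hz : PySem.Dict.getD indeg (pvLook gd n) 0 - 1 = 0
        · rw [if_pos hz]
          have hz' : pvCnt gd (pvLook gd n) (PySem.Set.discard live n) = 0 := by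
            have := hv ▸ hz
            exact_mod_cast this
          have h2' : ∀ x ∈ pvLook gd n :: rest, x ∈ PySem.Set.discard live n := by
            intro x hx
            rcases List.mem_cons.1 hx with rfl | hx
            · exact htl'
            · exact hrest_live' x hx
          have h3' : (pvLook gd n :: rest).Nodup := by
            rw [List.nodup_cons]
            refine ⟨fun htr => ?_, (List.nodup_cons.1 h3).2⟩
            have := h4 _ (List.mem_cons_of_mem n htr)
            omega
          have h4' : ∀ u ∈ pvLook gd n :: rest, pvCnt gd u (PySem.Set.discard live n) = 0 := by
            intro u hu
            rcases List.mem_cons.1 hu with rfl | hu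
            · exact hz'
            · exact hrest0 u hu
          have h6' : ∀ u ∈ PySem.Set.discard live n,
              pvCnt gd u (PySem.Set.discard live n) = 0 → u ∈ pvLook gd n :: rest := by
            intro u hu hc0
            by_cases hut : u = pvLook gd n
            · exact hut ▸ List.mem_cons_self
            · have hcc : pvCnt gd u live = 0 := by
                rw [hcntd u, beq_eq_false_iff_ne.2 (fun he => hut he.symm), hc0]
                simp
              rcases List.mem_cons.1 (h6 u ((hmem' u).1 hu).1 hcc) with rfl | h
              · exact absurd ((hmem' u).1 hu).2 (by simp)
              · exact List.mem_cons_of_mem _ h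
          obtain ⟨c1, c2, c3⟩ := ih (PySem.Set.discard live n) _ (pvLook gd n :: rest)
            hnd' h2' h3' h4' h5' h6' (by omega)
          exact ⟨fun x hx => ((hmem' x).1 (c1 x hx)).1, c2,
            fun T hT hcl x hx => c3 T (hT' T hT hcl) hcl x hx⟩
        · rw [if_neg hz]
          have hz' : pvCnt gd (pvLook gd n) (PySem.Set.discard live n) ≠ 0 := by
            intro hc0
            apply hz
            rw [hv, hc0]
            simp
          have h6' : ∀ u ∈ PySem.Set.discard live n,
              pvCnt gd u (PySem.Set.discard live n) = 0 → u ∈ rest := by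
            intro u hu hc0
            by_cases hut : u = pvLook gd n
            · exact absurd (hut ▸ hc0) hz'
            · have hcc : pvCnt gd u live = 0 := by
                rw [hcntd u, beq_eq_false_iff_ne.2 (fun he => hut he.symm), hc0]
                simp
              rcases List.mem_cons.1 (h6 u ((hmem' u).1 hu).1 hcc) with rfl | h
              · exact absurd ((hmem' u).1 hu).2 (by simp)
              · exact h
          obtain ⟨c1, c2, c3⟩ := ih (PySem.Set.discard live n) _ rest
            hnd' hrest_live' (List.nodup_cons.1 h3).2 hrest0 h5' h6' (by omega)
          exact ⟨fun x hx => ((hmem' x).1 (c1 x hx)).1, c2,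
            fun T hT hcl x hx => c3 T (hT' T hT hcl) hcl x hx⟩
      · rw [if_neg hin]
        have htl' : pvLook gd n ∉ PySem.Set.discard live n :=
          fun h => hin ((PySem.Set.contains_iff _ _).2 h)
        have h5' : ∀ u ∈ PySem.Set.discard live n,
            PySem.Dict.getD indeg u 0 = (pvCnt gd u (PySem.Set.discard live n) : Int) := by
          intro u hu
          have hut : u ≠ pvLook gd n := fun he => htl' (he ▸ hu)
          rw [h5 u ((hmem' u).1 hu).1, hcntd u,
            beq_eq_false_iff_ne.2 (fun he => hut he.symm)]
          simp
        have h6' : ∀ u ∈ PySem.Set.discard live n,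
            pvCnt gd u (PySem.Set.discard live n) = 0 → u ∈ rest := by
          intro u hu hc0
          have hut : u ≠ pvLook gd n := fun he => htl' (he ▸ hu)
          have hcc : pvCnt gd u live = 0 := by
            rw [hcntd u, beq_eq_false_iff_ne.2 (fun he => hut he.symm), hc0]
            simp
          rcases List.mem_cons.1 (h6 u ((hmem' u).1 hu).1 hcc) with rfl | h
          · exact absurd ((hmem' u).1 hu).2 (by simp)
          · exact h
        obtain ⟨c1, c2, c3⟩ := ih (PySem.Set.discard live n) indeg rest
          hnd' hrest_live' (List.nodup_cons.1 h3).2 hrest0 h5' h6' (by omega)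
        exact ⟨fun x hx => ((hmem' x).1 (c1 x hx)).1, c2,
          fun T hT hcl x hx => c3 T (hT' T hT hcl) hcl x hx⟩

theorem pv_filter_char {l sub : List Int} {p : Int → Bool} (h : sub = l.filter p) :
    sub = l.filter (fun x => decide (x ∈ sub)) := by
  subst h
  refine (List.filter_congr fun x hx => ?_).symm
  by_cases hp : p x = true <;> simp [List.mem_filter, hx, hp]

-- A's fixpoint loop: its result is closed, contains every closed subset, and stays a
-- filter of the original nodeset (so its order is determined)
theorem pv_loopA (gd : List (Int × Int)) (nodeset : List Int) :
    ∀ (fuel : Nat) (ns red : List Int),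
    ns.Nodup →
    red = pvRed gd ns →
    ns = nodeset.filter (fun x => decide (x ∈ ns)) →
    ns.length + 1 ≤ fuel →
    (∀ x ∈ pruneLoopA gd fuel ns red, x ∈ ns) ∧
    pvClosed gd (pruneLoopA gd fuel ns red) ∧
    (∀ T, (∀ x ∈ T, x ∈ ns) → pvClosed gd T → ∀ x ∈ T, x ∈ pruneLoopA gd fuel ns red) ∧
    pruneLoopA gd fuel ns red
      = nodeset.filter (fun x => decide (x ∈ pruneLoopA gd fuel ns red)) := by
  intro fuel
  induction fuel with
  | zero => intro ns red _ _ _ hfuel; omega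
  | succ fuel ih =>
    intro ns red hnd hred hchar hfuel
    by_cases heq : PySem.Set.equal red ns = true
    · have hstep : pruneLoopA gd (fuel + 1) ns red = ns := by
        simp only [pruneLoopA]
        rw [if_pos heq]
      rw [hstep]
      refine ⟨fun x hx => hx, ?_, fun T hT _ x hx => hT x hx, hchar⟩
      intro m hm
      have hmred : m ∈ red := ((PySem.Set.equal_iff _ _).1 heq m).2 hm
      rw [hred] at hmred
      have hmap : m ∈ PySem.Set.ofList (ns.map (pvLook gd)) := ((PySem.Set.mem_inter _ _ _).1 hmred).2
      rw [PySem.Set.mem_ofList] at hmap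
      obtain ⟨p, hp, hpe⟩ := List.mem_map.1 hmap
      exact ⟨p, hp, hpe⟩
    · have hstep : pruneLoopA gd (fuel + 1) ns red = pruneLoopA gd fuel red (pvRed gd red) := by
        simp only [pruneLoopA]
        rw [if_neg heq]
      rw [hstep]
      have hfil : red = ns.filter
          (fun x => PySem.Set.contains (PySem.Set.ofList (ns.map (pvLook gd))) x) := hred
      have hsubred : ∀ x ∈ red, x ∈ ns := fun x hx => (List.mem_filter.1 (hfil ▸ hx)).1
      have hndred : red.Nodup := hfil ▸ hnd.filter _
      have hcharred : red = nodeset.filter (fun x => decide (x ∈ red)) := by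
        have hr1 : red = ns.filter (fun x => decide (x ∈ red)) := pv_filter_char hfil
        conv_lhs => rw [hr1]
        conv_lhs => rw [hchar]
        rw [List.filter_filter]
        refine List.filter_congr fun x hx => ?_
        by_cases hxr : x ∈ red
        · simp [hxr, hsubred x hxr]
        · simp [hxr]
      have hlen : red.length < ns.length := by
        have hsl : red.Sublist ns := hfil ▸ List.filter_sublist
        rcases Nat.lt_or_ge red.length ns.length with h | h
        · exact h
        · exfalso
          have hee : red = ns := hsl.eq_of_length (le_antisymm hsl.length_le h)
          exact heq ((PySem.Set.equal_iff _ _).2 (fun x => by rw [hee]))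
      obtain ⟨a1, a2, a3, a4⟩ := ih red (pvRed gd red) hndred rfl hcharred (by omega)
      refine ⟨fun x hx => hsubred x (a1 x hx), a2, ?_, a4⟩
      intro T hT hcl x hx
      refine a3 T (fun y hy => ?_) hcl x hx
      rw [hred]
      refine (PySem.Set.mem_inter _ _ _).2 ⟨hT y hy, ?_⟩
      rw [PySem.Set.mem_ofList]
      obtain ⟨p, hp, hpe⟩ := hcl y hy
      exact List.mem_map.2 ⟨p, hT p hp, hpe⟩

theorem pv_ns0_eq_live0 (gd : List (Int × Int)) (nodeset : List Int) (hnd : nodeset.Nodup) :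
    pvNs0 gd nodeset = pvLive0 gd nodeset := by
  unfold pvNs0 pvLive0
  have h2 : PySem.Set.ofList (nodeset.filter (fun n => PySem.Dict.contains (PySem.Dict.mk gd) n))
      = nodeset.filter (fun n => PySem.Dict.contains (PySem.Dict.mk gd) n) :=
    PySem.Set.ofList_eq_self_of_nodup _ (List.Nodup.filter _ hnd)
  rw [h2]
  show nodeset.filter _ = nodeset.filter _
  refine List.filter_congr fun x hx => ?_
  apply pv_bool_eq_of_iff
  rw [PySem.Set.contains_iff _ _, PySem.Dict.contains_iff_mem_keys, PySem.Set.mem_ofList]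

theorem pv_ns0_filter_char (gd : List (Int × Int)) (nodeset : List Int) :
    pvNs0 gd nodeset = nodeset.filter (fun x => decide (x ∈ pvNs0 gd nodeset)) := by
  exact pv_filter_char (p := fun x =>
    PySem.Set.contains (PySem.Set.ofList (PySem.Dict.keys (PySem.Dict.mk gd))) x) rfl

-- ===== VERDICT (by name: the statement is the Claim_ definition above) =====
theorem prune_by_nodeset_spec : Claim_equal_prune_by_nodeset := by
  intro gd nodeset hdom hpre
  unfold Pre_prune_by_nodeset at hpre
  unfold Spec_prune_by_nodeset
  unfold prune_by_nodeset prune_by_nodeset_alt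
  have hEq : pvNs0 gd nodeset = pvLive0 gd nodeset := pv_ns0_eq_live0 gd nodeset hpre
  by_cases h0 : pvNs0 gd nodeset = []
  · rw [if_pos h0]
    have hl0 : pvLive0 gd nodeset = [] := by rw [← hEq]; exact h0
    rw [hl0]
    simp only [List.length_nil, pruneLoopB]
    have : ∀ n : Int, PySem.Set.contains ([] : PySem.Set Int) n = false := by
      intro n; simp [PySem.Set.contains]
    simp only [this, List.filter_false, List.foldl_nil]
    rfl
  · rw [if_neg h0]
    have hLnd : (pvLive0 gd nodeset).Nodup := PySem.Set.nodup_ofList _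
    have hns0nd : (pvNs0 gd nodeset).Nodup := by rw [hEq]; exact hLnd
    obtain ⟨a1, a2, a3, a4⟩ := pv_loopA gd nodeset ((pvNs0 gd nodeset).length + 1)
      (pvNs0 gd nodeset) (pvRed gd (pvNs0 gd nodeset)) hns0nd rfl
      (pv_ns0_filter_char gd nodeset) (le_refl _)
    have hcnt := pv_countB_getD gd (pvLive0 gd nodeset)
    have hs0sub : ∀ x ∈ pvStack0 gd (pvLive0 gd nodeset), x ∈ pvLive0 gd nodeset :=
      fun x hx => (List.mem_filter.1 hx).1
    have hs0nd : (pvStack0 gd (pvLive0 gd nodeset)).Nodup := hLnd.filter _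
    have hs00 : ∀ u ∈ pvStack0 gd (pvLive0 gd nodeset), pvCnt gd u (pvLive0 gd nodeset) = 0 := by
      intro u hu
      have hb := (List.mem_filter.1 hu).2
      rw [hcnt u (List.mem_filter.1 hu).1] at hb
      have : (pvCnt gd u (pvLive0 gd nodeset) : Int) = 0 := by
        exact beq_iff_eq.1 hb
      exact_mod_cast this
    have hs0c : ∀ u ∈ pvLive0 gd nodeset, pvCnt gd u (pvLive0 gd nodeset) = 0 →
        u ∈ pvStack0 gd (pvLive0 gd nodeset) := by
      intro u hu hc
      refine List.mem_filter.2 ⟨hu, ?_⟩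
      rw [hcnt u hu, hc]
      simp
    obtain ⟨b1, b2, b3⟩ := pv_peelB gd (pvLive0 gd nodeset).length (pvLive0 gd nodeset)
      (pruneCountB gd (pvLive0 gd nodeset)) (pvStack0 gd (pvLive0 gd nodeset))
      hLnd hs0sub hs0nd hs00 hcnt hs0c (le_refl _)
    have hAB : ∀ x, x ∈ pruneLoopA gd ((pvNs0 gd nodeset).length + 1) (pvNs0 gd nodeset)
          (pvRed gd (pvNs0 gd nodeset))
        ↔ x ∈ pruneLoopB gd (pvLive0 gd nodeset).length (pvLive0 gd nodeset)
          (pruneCountB gd (pvLive0 gd nodeset)) (pvStack0 gd (pvLive0 gd nodeset)) := by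
      intro x
      constructor
      · intro hx
        exact b3 _ (fun y hy => by rw [← hEq]; exact a1 y hy) a2 x hx
      · intro hx
        exact a3 _ (fun y hy => by rw [hEq]; exact b1 y hy) b2 x hx
    have hlists : pruneLoopA gd ((pvNs0 gd nodeset).length + 1) (pvNs0 gd nodeset)
          (pvRed gd (pvNs0 gd nodeset))
        = nodeset.filter (fun n => PySem.Set.contains (pruneLoopB gd
            (pvLive0 gd nodeset).length (pvLive0 gd nodeset)
            (pruneCountB gd (pvLive0 gd nodeset)) (pvStack0 gd (pvLive0 gd nodeset))) n) := by
      conv_lhs => rw [a4]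
      refine List.filter_congr fun x hx => ?_
      apply pv_bool_eq_of_iff
      rw [PySem.Set.contains_iff _ _]
      simp only [decide_eq_true_eq]
      exact hAB x
    rw [hlists]
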